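-- pv_equiv track=rewrite | github.com/Yerzh030/python-ds | 15_IDE/07_years/main.py | check_year
-- ===== SOURCE A (Python) =====
-- def check_year(year):
--     numone = numtwo = year
--     count= 0
--     while numone != 0:
--         n1 = numone % 10
--         count  = 1
--         numone = numone // 10
--         numtwo = numone
--         while numtwo != 0:
--             n2 = numtwo %10
--             numtwo = numtwo //10
--             if n1 == n2:
--                 count +=1
--             if count == 3:
--                 return  True
--     return  False
-- ===== SOURCE B (Python) =====
-- def check_year(year):
--     counts = {}
--     while year != 0:
--         d = year % 10
--         c = counts.get(d, 0) + 1
--         if c == 3: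
--             return True
--         counts[d] = c
--         year = year // 10
--     return False
-- ===== Notes on version B (the rewrite author's own statement) =====
-- stated objective: alternative
-- what changed: Replaced the nested pairwise digit scan (restarting an inner digit loop for every digit) by a single pass that extracts each digit once and keeps per-digit counts in a dict, returning True as soon as some count reaches three.
-- outside the precondition, e.g. on check_year(-1): A returns True, B returns True; on check_year(-1000000): A returns True, B returns True; on check_year(-2): A does not finish within the time limit, B returns True
import Mathlib
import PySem

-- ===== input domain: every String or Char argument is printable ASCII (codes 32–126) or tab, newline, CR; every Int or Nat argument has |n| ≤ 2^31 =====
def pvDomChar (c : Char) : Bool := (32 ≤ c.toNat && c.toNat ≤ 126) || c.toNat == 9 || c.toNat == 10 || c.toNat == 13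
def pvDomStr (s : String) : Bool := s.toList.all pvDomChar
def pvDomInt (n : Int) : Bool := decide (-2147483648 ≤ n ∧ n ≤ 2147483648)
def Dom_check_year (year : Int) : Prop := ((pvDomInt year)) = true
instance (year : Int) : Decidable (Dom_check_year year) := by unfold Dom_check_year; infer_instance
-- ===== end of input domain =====

-- B replaces A's nested per-digit rescans by a single digit pass keeping per-digit counts in a dict
-- (objective: alternative; one counting pass instead of the nested pairwise scan).


-- ===== PORT A =====
-- Inner while loop of A: scans the digits of numtwo against the fixed digit n1,
-- incrementing count, returning True the moment count reaches three.
def cyInner (n1 : Nat) (numtwo : Nat) (count : Nat) : Bool :=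
  if h : numtwo = 0 then false
  else
    let n2 := numtwo % 10
    let count' := if n1 = n2 then count + 1 else count
    if count' = 3 then true else cyInner n1 (numtwo / 10) count'
termination_by numtwo
decreasing_by exact Nat.div_lt_self (Nat.pos_of_ne_zero h) (by norm_num)

-- Outer while loop of A over numone.
def cyOuter (numone : Nat) : Bool :=
  if h : numone = 0 then false
  else
    let n1 := numone % 10
    if cyInner n1 (numone / 10) 1 then true else cyOuter (numone / 10)
termination_by numone
decreasing_by exact Nat.div_lt_self (Nat.pos_of_ne_zero h) (by norm_num)

-- Under Pre_ (0 ≤ year) Python's % 10 and // 10 coincide with Nat.mod/Nat.div on year.toNat,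
-- so the loops are transcribed over Nat (negative years are outside Pre_; the ports run on year.toNat).
def check_year (year : Int) : Bool := cyOuter year.toNat

-- ===== PORT B =====
-- B's single while loop: counts digits in a dict, True as soon as some count reaches three.
def cyAltLoop (n : Nat) (counts : PySem.Dict Nat Nat) : Bool :=
  if h : n = 0 then false
  else
    let d := n % 10
    let c := counts.getD d 0 + 1
    if c = 3 then true else cyAltLoop (n / 10) (counts.insert d c)
termination_by n
decreasing_by exact Nat.div_lt_self (Nat.pos_of_ne_zero h) (by norm_num)

def check_year_alt (year : Int) : Bool := cyAltLoop year.toNat PySem.Dict.empty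

-- ===== PRECONDITION & SPEC =====
-- Pre_ excludes negative years: there Python A's floor division keeps the value at -1 forever, so A
-- loops without returning on most of them (and on the few where the inner scan reaches a triple, e.g. -1, it
-- happens to return True, as does B).
def Pre_check_year (year : Int) : Prop := 0 ≤ year
instance (year : Int) : Decidable (Pre_check_year year) := by unfold Pre_check_year; infer_instance
def pvWitness_check_year : Int := (1998)

def Spec_check_year (year : Int) (out : Bool) : Prop := out = check_year_alt year
instance (year : Int) (out : Bool) : Decidable (Spec_check_year year out) := by unfold Spec_check_year; infer_instance

-- ===== CLAIM (what is proved, stated in full; the proofs are below) =====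
def Claim_equal_check_year : Prop := ∀ (year : Int), Dom_check_year year → Pre_check_year year → Spec_check_year year (check_year year)

-- ===== LEMMAS AND PROOFS =====
-- The digit list of n, least significant first.
def cyDigits (n : Nat) : List Nat :=
  if h : n = 0 then [] else n % 10 :: cyDigits (n / 10)
termination_by n
decreasing_by exact Nat.div_lt_self (Nat.pos_of_ne_zero h) (by norm_num)

theorem cyInner_iff (n1 : Nat) : ∀ m count, count < 3 →
    (cyInner n1 m count = true ↔ 3 ≤ count + (cyDigits m).count n1) := by
  intro m
  induction m using Nat.strong_induction_on with
  | _ m ih =>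
    intro count hc
    by_cases h : m = 0
    · subst h
      simp [cyInner, cyDigits]
      omega
    · rw [cyInner, cyDigits]
      simp only [h, dite_false]
      have hd := Nat.div_lt_self (Nat.pos_of_ne_zero h) (by norm_num : 1 < 10)
      have hcount : (m % 10 :: cyDigits (m / 10)).count n1
          = (cyDigits (m / 10)).count n1 + (if m % 10 = n1 then 1 else 0) := by
        rw [List.count_cons]
        simp
      by_cases he : n1 = m % 10
      · rw [if_pos he]
        rw [if_pos he.symm] at hcount
        by_cases h3 : count + 1 = 3
        · rw [if_pos h3]
          constructor
          · intro _
            rw [hcount]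
            omega
          · intro _
            rfl
        · rw [if_neg h3]
          rw [ih (m / 10) hd (count + 1) (by omega), hcount]
          omega
      · rw [if_neg he]
        rw [if_neg (fun hh : m % 10 = n1 => he hh.symm)] at hcount
        rw [if_neg (by omega : ¬ count = 3)]
        rw [ih (m / 10) hd count hc, hcount]
        omega

theorem cyOuter_iff : ∀ n, (cyOuter n = true ↔ ∃ d ∈ cyDigits n, 3 ≤ (cyDigits n).count d) := by
  intro n
  induction n using Nat.strong_induction_on with
  | _ n ih =>
    by_cases h : n = 0
    · subst h; simp [cyOuter, cyDigits]
    · rw [cyOuter, cyDigits]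
      simp only [h, dite_false]
      have hrec := ih (n / 10) (Nat.div_lt_self (Nat.pos_of_ne_zero h) (by norm_num))
      have hin := cyInner_iff (n % 10) (n / 10) 1 (by norm_num)
      constructor
      · intro htrue
        by_cases hi : cyInner (n % 10) (n / 10) 1 = true
        · refine ⟨n % 10, by simp, ?_⟩
          have h1 := hin.mp hi
          have hcc : (n % 10 :: cyDigits (n / 10)).count (n % 10)
              = (cyDigits (n / 10)).count (n % 10) + 1 := by
            simp
          omega
        · simp only [hi] at htrue
          obtain ⟨e, heL, hce⟩ := hrec.mp htrue
          refine ⟨e, List.mem_cons_of_mem _ heL, ?_⟩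
          have hcc : (n % 10 :: cyDigits (n / 10)).count e
              ≥ (cyDigits (n / 10)).count e := by
            rw [List.count_cons]
            omega
          omega
      · rintro ⟨e, he, hce⟩
        by_cases hed : e = n % 10
        · subst hed
          have hcc : (n % 10 :: cyDigits (n / 10)).count (n % 10)
              = (cyDigits (n / 10)).count (n % 10) + 1 := by
            simp
          have h1 : cyInner (n % 10) (n / 10) 1 = true := hin.mpr (by omega)
          simp [h1]
        · have heL : e ∈ cyDigits (n / 10) := by
            rcases List.mem_cons.mp he with h' | h'
            · exact absurd h' hed
            · exact h'
          have hcc : (n % 10 :: cyDigits (n / 10)).count e = (cyDigits (n / 10)).count e := by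
            rw [List.count_cons]
            simp
            exact fun hh => hed hh.symm
          have h2 : cyOuter (n / 10) = true := hrec.mpr ⟨e, heL, by omega⟩
          simp [h2]

theorem cyAlt_iff : ∀ n counts, (∀ d, counts.getD d 0 ≤ 2) →
    (cyAltLoop n counts = true ↔
      ∃ d ∈ cyDigits n, 3 ≤ counts.getD d 0 + (cyDigits n).count d) := by
  intro n
  induction n using Nat.strong_induction_on with
  | _ n ih =>
    intro counts hbd
    by_cases h : n = 0
    · subst h; simp [cyAltLoop, cyDigits]
    · rw [cyAltLoop, cyDigits]
      simp only [h, dite_false]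
      by_cases h3 : counts.getD (n % 10) 0 + 1 = 3
      · simp only [h3, if_true]
        constructor
        · intro _
          refine ⟨n % 10, by simp, ?_⟩
          have hcc : (n % 10 :: cyDigits (n / 10)).count (n % 10)
              = (cyDigits (n / 10)).count (n % 10) + 1 := by
            simp
          omega
        · intro _; trivial
      · simp only [h3, if_false]
        have hc2 : counts.getD (n % 10) 0 + 1 ≤ 2 := by have := hbd (n % 10); omega
        have hbd' : ∀ e, (counts.insert (n % 10) (counts.getD (n % 10) 0 + 1)).getD e 0 ≤ 2 := by
          intro e
          rw [PySem.Dict.getD_insert]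
          split
          · omega
          · exact hbd e
        rw [ih (n / 10) (Nat.div_lt_self (Nat.pos_of_ne_zero h) (by norm_num)) _ hbd']
        constructor
        · rintro ⟨e, heL, hce⟩
          rw [PySem.Dict.getD_insert] at hce
          refine ⟨e, List.mem_cons_of_mem _ heL, ?_⟩
          by_cases hed : e = n % 10
          · subst hed
            rw [if_pos rfl] at hce
            have hcc : (n % 10 :: cyDigits (n / 10)).count (n % 10)
                = (cyDigits (n / 10)).count (n % 10) + 1 := by
              simp
            omega
          · rw [if_neg hed] at hce
            have hcc : (n % 10 :: cyDigits (n / 10)).count e = (cyDigits (n / 10)).count e := by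
              simp [List.count_cons]
              exact fun hh => hed hh.symm
            omega
        · rintro ⟨e, he, hce⟩
          by_cases hed : e = n % 10
          · subst hed
            have hcc : (n % 10 :: cyDigits (n / 10)).count (n % 10)
                = (cyDigits (n / 10)).count (n % 10) + 1 := by
              simp
            have hpos : 0 < (cyDigits (n / 10)).count (n % 10) := by omega
            refine ⟨n % 10, List.count_pos_iff.mp hpos, ?_⟩
            rw [PySem.Dict.getD_insert, if_pos rfl]
            omega
          · have heL : e ∈ cyDigits (n / 10) := by
              rcases List.mem_cons.mp he with h' | h'
              · exact absurd h' hed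
              · exact h'
            have hcc : (n % 10 :: cyDigits (n / 10)).count e = (cyDigits (n / 10)).count e := by
              simp [List.count_cons]
              exact fun hh => hed hh.symm
            refine ⟨e, heL, ?_⟩
            rw [PySem.Dict.getD_insert, if_neg hed]
            omega

-- ===== VERDICT (by name: the statement is the Claim_ definition above) =====
theorem check_year_spec : Claim_equal_check_year := by
  intro year _ hpre
  unfold Spec_check_year check_year check_year_alt
  obtain ⟨n, rfl⟩ : ∃ n : ℕ, year = (n : Int) := ⟨year.toNat, (Int.toNat_of_nonneg hpre).symm⟩
  rw [Int.toNat_natCast]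
  rw [Bool.eq_iff_iff]
  rw [cyOuter_iff n, cyAlt_iff n PySem.Dict.empty (by intro d; simp [PySem.Dict.getD_empty])]
  constructor <;> rintro ⟨e, he, hc⟩ <;> exact ⟨e, he, by simpa [PySem.Dict.getD_empty] using hc⟩
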